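-- pv_equiv track=rewrite | github.com/joeldavis84/switchport-management | app/switches/arista_utils.py | _trunk_spec_includes_vlan
-- ===== SOURCE A (Python) =====
-- def _trunk_spec_includes_vlan(spec: str, vid: int) -> bool:
--     """Best-effort parse of EOS trunk allowed VLAN list (e.g. 10,20,30-40,1-4094)."""
--     spec = spec.strip().lower()
--     if spec in ("", "none"):
--         return False
--     if spec in ("1-4094", "all"):
--         return True
--     for part in spec.replace(" ", "").split(","):
--         if not part:
--             continue
--         if "-" in part:
--             lo_s, hi_s = part.split("-", 1)
--             try:
--                 lo, hi = int(lo_s), int(hi_s)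
--                 if lo <= vid <= hi:
--                     return True
--             except ValueError:
--                 continue
--         else:
--             try:
--                 if int(part) == vid:
--                     return True
--             except ValueError:
--                 continue
--     return False
-- ===== SOURCE B (Python) =====
-- def _parse(part):
--     """One comma token -> inclusive (lo, hi) interval, or None on ValueError."""
--     lo_s, sep, hi_s = part.partition("-")
--     try:
--         lo = int(lo_s)
--         hi = int(hi_s) if sep else lo
--     except ValueError:
--         return None
--     return (lo, hi)
--
--
-- def _trunk_spec_includes_vlan(spec: str, vid: int) -> bool:
--     """Best-effort parse of EOS trunk allowed VLAN list (e.g. 10,20,30-40,1-4094)."""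
--     spec = spec.strip().lower()
--     if spec in ("", "none"):
--         return False
--     if spec in ("1-4094", "all"):
--         return True
--     intervals = sorted(
--         (iv for iv in map(_parse, spec.replace(" ", "").split(",")) if iv is not None),
--         key=lambda iv: iv[0],
--     )
--     for lo, hi in intervals:
--         if vid < lo:
--             return False  # sorted by lo: no later interval can start at or below vid
--         if vid <= hi:
--             return True
--     return False
-- ===== Notes on version B (the rewrite author's own statement) =====
-- stated objective: alternative
-- what changed: A interleaves parsing and testing in one early-return loop; B first parses all comma tokens into inclusive (lo,hi) intervals via str.partition, sorts them by lo, then scans the sorted list with an early cutoff (once vid < lo no later interval can match, since all later los are at least as large), a sort-then-prune strategy instead of A's scan-and-return.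
import Mathlib
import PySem

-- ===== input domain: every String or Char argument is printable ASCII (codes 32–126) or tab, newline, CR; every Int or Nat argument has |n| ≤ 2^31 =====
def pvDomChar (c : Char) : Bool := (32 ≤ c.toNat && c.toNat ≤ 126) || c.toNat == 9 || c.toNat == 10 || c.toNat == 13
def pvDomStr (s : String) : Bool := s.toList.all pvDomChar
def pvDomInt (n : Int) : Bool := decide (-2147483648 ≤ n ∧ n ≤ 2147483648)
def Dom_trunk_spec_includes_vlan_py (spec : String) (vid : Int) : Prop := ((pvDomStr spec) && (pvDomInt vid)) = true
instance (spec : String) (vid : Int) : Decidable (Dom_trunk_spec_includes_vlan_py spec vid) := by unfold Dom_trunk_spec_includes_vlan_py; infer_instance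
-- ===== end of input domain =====

-- B parses the spec into (lo,hi) intervals, sorts them by lo, and scans the sorted list
-- with an early cutoff, instead of A's single interleaved scan-and-early-return loop
-- (objective: alternative, sort-then-prune).


-- ===== PORT A =====
-- the for-loop over the comma parts, with its early returns and continues
def pvALoop (vid : Int) : List String → Bool
  | [] => false
  | part :: rest =>
    if part = "" then pvALoop vid rest
    else if PySem.Str.isIn "-" part then
      match PySem.Str.splitMax? part "-" 1 with
      | some [lo_s, hi_s] =>
        match PySem.Int.ofStr? lo_s, PySem.Int.ofStr? hi_s with
        | some lo, some hi => if lo ≤ vid ∧ vid ≤ hi then true else pvALoop vid rest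
        | _, _ => pvALoop vid rest
      | _ => pvALoop vid rest   -- unreachable: split(sep, 1) with sep ∈ part yields two pieces
    else
      match PySem.Int.ofStr? part with
      | some n => if n = vid then true else pvALoop vid rest
      | none => pvALoop vid rest

def trunk_spec_includes_vlan_py (spec : String) (vid : Int) : Bool :=
  let spec := PySem.Str.lower (PySem.Str.strip spec)
  if spec = "" ∨ spec = "none" then false
  else if spec = "1-4094" ∨ spec = "all" then true
  else pvALoop vid ((PySem.Str.split? (PySem.Str.replace spec " " "") ",").getD [])  -- sep "," nonempty, split? is always some

-- ===== PORT B =====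
-- hand port of part.partition("-") (exact: split(sep, 1) with sep ∈ part yields the two pieces;
-- the fallback arm of the inner match is unreachable). Bool = "separator found".
def pvPartitionDash (part : String) : String × String × Bool :=
  if PySem.Str.isIn "-" part then
    match PySem.Str.splitMax? part "-" 1 with
    | some [a, b] => (a, b, true)
    | _ => ("", "", false)   -- unreachable
  else (part, "", false)

-- _parse: one comma token → inclusive interval, or none on ValueError
def pvParse (part : String) : Option (Int × Int) :=
  match pvPartitionDash part with
  | (lo_s, hi_s, sep) =>
    match PySem.Int.ofStr? lo_s with
    | none => none
    | some lo =>
      if sep then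
        match PySem.Int.ofStr? hi_s with
        | none => none
        | some hi => some (lo, hi)
      else some (lo, lo)

-- the final loop over the lo-sorted intervals, with its two early returns
def pvBScan (vid : Int) : List (Int × Int) → Bool
  | [] => false
  | (lo, hi) :: rest =>
    if vid < lo then false          -- sorted by lo: no later interval can start at or below vid
    else if vid ≤ hi then true
    else pvBScan vid rest

def trunk_spec_includes_vlan_py_alt (spec : String) (vid : Int) : Bool :=
  let spec := PySem.Str.lower (PySem.Str.strip spec)
  if spec = "" ∨ spec = "none" then false
  else if spec = "1-4094" ∨ spec = "all" then true
  else
    let parts := (PySem.Str.split? (PySem.Str.replace spec " " "") ",").getD []  -- sep "," nonempty, split? is always some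
    let intervals := PySem.List.sorted ((parts.map pvParse).reduceOption) Prod.fst false
    pvBScan vid intervals

-- ===== PRECONDITION & SPEC =====
def Spec_trunk_spec_includes_vlan_py (spec : String) (vid : Int) (out : Bool) : Prop := out = trunk_spec_includes_vlan_py_alt spec vid
instance (spec : String) (vid : Int) (out : Bool) : Decidable (Spec_trunk_spec_includes_vlan_py spec vid out) := by unfold Spec_trunk_spec_includes_vlan_py; infer_instance

-- ===== CLAIM (what is proved, stated in full; the proofs are below) =====
def Claim_equal_trunk_spec_includes_vlan_py : Prop := ∀ (spec : String) (vid : Int), Dom_trunk_spec_includes_vlan_py spec vid → Spec_trunk_spec_includes_vlan_py spec vid (trunk_spec_includes_vlan_py spec vid)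

-- ===== LEMMAS AND PROOFS =====

-- A's loop equals "parse every part, then test membership over all parsed intervals"
set_option maxHeartbeats 1600000 in
theorem pvALoop_eq_any (vid : Int) (parts : List String) :
    pvALoop vid parts
      = ((parts.map pvParse).reduceOption).any (fun iv => decide (iv.1 ≤ vid ∧ vid ≤ iv.2)) := by
  have h0 : PySem.Int.ofStr? "" = none := rfl
  induction parts with
  | nil => rfl
  | cons part rest ih =>
    by_cases hempty : part = ""
    · subst hempty
      simpa [pvALoop, pvParse, pvPartitionDash, PySem.Str.isIn, PySem.Chars.isIn,
             h0, List.reduceOption] using ih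
    · simp only [pvALoop, hempty, if_false, pvParse, pvPartitionDash, List.map_cons]
      by_cases hdash : PySem.Str.isIn "-" part = true
      · simp only [hdash, if_true]
        cases hsplit : PySem.Str.splitMax? part "-" 1 with
        | none => simpa [List.reduceOption, h0] using ih
        | some pieces =>
          match pieces with
          | [] => simpa [List.reduceOption, h0] using ih
          | [x] => simpa [List.reduceOption, h0] using ih
          | [lo_s, hi_s] =>
            cases hlo : PySem.Int.ofStr? lo_s with
            | none => simpa [List.reduceOption, hlo] using ih
            | some lo =>
              cases hhi : PySem.Int.ofStr? hi_s with
              | none => simpa [List.reduceOption, hlo, hhi] using ih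
              | some hi =>
                by_cases hin : lo ≤ vid ∧ vid ≤ hi
                · simp [List.reduceOption, hlo, hhi, hin.1, hin.2]
                · have hb : (decide (lo ≤ vid) && decide (vid ≤ hi)) = false := by
                    rcases not_and_or.mp hin with h | h <;> simp [h]
                  simp [List.reduceOption, hlo, hhi, hb, ih]
          | x :: y :: z :: t => simpa [List.reduceOption, h0] using ih
      · simp only [hdash]
        cases hn : PySem.Int.ofStr? part with
        | none => simpa [List.reduceOption, hn] using ih
        | some n =>
          by_cases heq : n = vid
          · simp [List.reduceOption, hn, heq]
          · have hb : (decide (n ≤ vid) && decide (vid ≤ n)) = false := by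
              simp only [Bool.and_eq_false_iff, decide_eq_false_iff_not]; omega
            simp [List.reduceOption, hn, hb, ih]
            exact fun h => absurd h heq

-- on a list whose lo components are nondecreasing, B's early-cutoff scan is the full membership test
theorem pvBScan_eq_any (vid : Int) (l : List (Int × Int))
    (hsorted : l.Pairwise (fun a b => a.1 ≤ b.1)) :
    pvBScan vid l = l.any (fun iv => decide (iv.1 ≤ vid ∧ vid ≤ iv.2)) := by
  induction l with
  | nil => rfl
  | cons head rest ih =>
    obtain ⟨lo, hi⟩ := head
    have hhead := (List.pairwise_cons.mp hsorted).1
    have htail := (List.pairwise_cons.mp hsorted).2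
    by_cases hlt : vid < lo
    · have hrest : rest.any (fun iv => decide (iv.1 ≤ vid ∧ vid ≤ iv.2)) = false := by
        rw [List.any_eq_false]
        intro iv hiv
        have hla : lo ≤ iv.1 := hhead iv hiv
        simp only [decide_eq_true_eq, not_and]
        intro h1
        omega
      have hb : pvBScan vid ((lo, hi) :: rest) = false := by simp [pvBScan, hlt]
      rw [hb, List.any_cons, hrest, Bool.or_false]
      symm
      rw [decide_eq_false_iff_not]
      omega
    · by_cases hhi : vid ≤ hi
      · simp [pvBScan, hlt, hhi, show lo ≤ vid ∧ vid ≤ hi by omega]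
      · simp [pvBScan, hlt, hhi, ih htail, show ¬ (lo ≤ vid ∧ vid ≤ hi) by omega]

-- any is insensitive to the sorting (a permutation)
theorem any_sorted_eq (vid : Int) (l : List (Int × Int)) :
    (PySem.List.sorted l Prod.fst false).any (fun iv => decide (iv.1 ≤ vid ∧ vid ≤ iv.2))
      = l.any (fun iv => decide (iv.1 ≤ vid ∧ vid ≤ iv.2)) :=
  (PySem.List.sorted_perm l Prod.fst false).any_eq

-- ===== VERDICT (by name: the statement is the Claim_ definition above) =====
theorem trunk_spec_includes_vlan_py_spec : Claim_equal_trunk_spec_includes_vlan_py := by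
  intro spec vid _
  unfold Spec_trunk_spec_includes_vlan_py trunk_spec_includes_vlan_py trunk_spec_includes_vlan_py_alt
  simp only []
  split_ifs with h1 h2
  · rfl
  · rfl
  · rw [pvBScan_eq_any vid _ (PySem.List.sorted_pairwise _ Prod.fst), any_sorted_eq]
    exact pvALoop_eq_any vid _
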